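-- pv_equiv track=rewrite | github.com/Vitor-Garcia-Comissoli/Codes_from_MAC0110 | MAC 0110/EPs/EP14/ep14.py | dicio_sucessores
-- ===== SOURCE A (Python) =====
-- def dicio_sucessores(lst):
--     '''(list) -> dict
--
--     RECEBE uma lista `lst`.
--     RETORNA um dicionário em que
--
--         - as __chaves__ são os itens que ocorrem em lst e
--         - o  __valor__ associado a cada chave é a lista dos
--           itens que ocorrem imediatamente após a chave na lista lst.
--
--     Por convenção a lista correspondente ao valor do último item
--     na lst (=lst[-1]) contém o primeiro item da lista (=lst[0]).
--
--     Se a `lst` é a lista vazia a função deve retornar o dicionário vazio.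
--     '''
--     dicio = {}
--
--     n = len(lst)
--
--     if n == 0:
--         return dicio
--
--     for i in range (-1, n-1):
--
--         if lst[i] in dicio:
--             lista = dicio[lst[i]]
--             lista += [lst[i+1]]
--             dicio[lst[i]] = lista
--
--         else:
--             lista = [lst[i+1]]
--             dicio[lst[i]] = lista
--
--     return dicio
-- ===== SOURCE B (Python) =====
-- def dicio_sucessores(lst):
--     if not lst:
--         return {}
--     pairs = [(lst[i - 1], lst[i]) for i in range(len(lst))]
--     return {k: [s for q, s in pairs if q == k] for k, _ in pairs}
-- ===== Notes on version B (the rewrite author's own statement) =====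
-- stated objective: alternative
-- what changed: Replaces A's single-pass index loop with wraparound indexing and in-place dict mutation (in-dict if/else append) by a two-stage grouping: first materialize the cyclic (predecessor, item) pair list, then a dict comprehension that builds each key's whole successor list at once with a per-key filter scan.
import Mathlib
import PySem

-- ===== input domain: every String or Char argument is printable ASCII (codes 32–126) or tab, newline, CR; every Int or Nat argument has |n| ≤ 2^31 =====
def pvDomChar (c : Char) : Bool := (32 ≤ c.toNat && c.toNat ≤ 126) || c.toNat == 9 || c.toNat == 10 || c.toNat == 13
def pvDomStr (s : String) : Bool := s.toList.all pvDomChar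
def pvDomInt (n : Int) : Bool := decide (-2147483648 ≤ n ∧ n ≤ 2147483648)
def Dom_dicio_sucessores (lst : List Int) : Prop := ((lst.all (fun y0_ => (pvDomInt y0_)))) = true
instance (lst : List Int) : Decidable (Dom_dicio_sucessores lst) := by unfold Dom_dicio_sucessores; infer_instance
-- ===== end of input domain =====

-- B replaces A's single-pass mutating loop by a staged grouping (cyclic pair list, then a
-- dict comprehension with a per-key filter); same return value on every input (objective: alternative).

-- ===== PORT A =====
def dicio_sucessores (lst : List Int) : List (Int × List Int) :=
  let dicio : PySem.Dict Int (List Int) := PySem.Dict.empty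
  let n : Int := lst.length
  if n == 0 then dicio.items
  else
    ((PySem.List.pyRange (-1) (n - 1) 1).foldl
      (fun dicio i =>
        match dicio.get? (PySem.List.pyGetD lst i 0) with
        | some lista => dicio.insert (PySem.List.pyGetD lst i 0) (lista ++ [PySem.List.pyGetD lst (i + 1) 0])
        | none => dicio.insert (PySem.List.pyGetD lst i 0) [PySem.List.pyGetD lst (i + 1) 0])
      dicio).items

-- ===== PORT B =====
def dicio_sucessores_alt (lst : List Int) : List (Int × List Int) :=
  if lst.isEmpty then []
  else
    let pairs : List (Int × Int) :=
      (PySem.List.pyRange 0 (PySem.List.len lst) 1).map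
        (fun i => (PySem.List.pyGetD lst (i - 1) 0, PySem.List.pyGetD lst i 0))
    (pairs.foldl
      (fun d kv => d.insert kv.1 ((pairs.filter (fun qs => qs.1 == kv.1)).map (·.2)))
      (PySem.Dict.empty : PySem.Dict Int (List Int))).items

-- ===== PRECONDITION & SPEC =====
def Spec_dicio_sucessores (lst : List Int) (out : List (Int × List Int)) : Prop := out = dicio_sucessores_alt lst
instance (lst : List Int) (out : List (Int × List Int)) : Decidable (Spec_dicio_sucessores lst out) := by unfold Spec_dicio_sucessores; infer_instance

-- ===== CLAIM (what is proved, stated in full; the proofs are below) =====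
def Claim_equal_dicio_sucessores : Prop := ∀ (lst : List Int), Dom_dicio_sucessores lst → Spec_dicio_sucessores lst (dicio_sucessores lst)

-- ===== LEMMAS AND PROOFS =====

-- two dicts with the same (duplicate-free) key list and the same lookups have the same items
lemma items_eq_of_keys_get? (d d' : PySem.Dict Int (List Int))
    (hk : d.keys = d'.keys) (hn : d.keys.Nodup)
    (hg : ∀ k, d.get? k = d'.get? k) : d.items = d'.items := by
  have hn' : d'.keys.Nodup := hk ▸ hn
  have hlen : d.items.length = d'.items.length := by
    have := congrArg List.length hk
    simpa [PySem.Dict.keys] using this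
  apply List.ext_getElem hlen
  intro i h1 h2
  have hkey : (d.items[i]).1 = (d'.items[i]).1 := by
    have h := List.getElem_of_eq hk (i := i) (by simpa [PySem.Dict.keys] using h1)
    simp only [PySem.Dict.keys, List.getElem_map] at h
    exact h
  have g1 : d.get? ((d.items[i]).1) = some ((d.items[i]).2) :=
    PySem.Dict.get?_of_mem_items d (by simp) hn
  have g2 : d'.get? ((d'.items[i]).1) = some ((d'.items[i]).2) :=
    PySem.Dict.get?_of_mem_items d' (by simp) hn'
  have h3 : some ((d.items[i]).2) = some ((d'.items[i]).2) := by
    rw [← g1, hg, hkey, g2]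
  exact Prod.ext hkey (Option.some.inj h3)

-- A's step (in-dict if/else append) is Dict.modify with default []
lemma step_eq (d : PySem.Dict Int (List Int)) (k v : Int) :
    (match d.get? k with
      | some lista => d.insert k (lista ++ [v])
      | none => d.insert k [v]) = d.modify k [] (fun l => l ++ [v]) := by
  cases h : d.get? k <;>
    simp [PySem.Dict.modify, PySem.Dict.getD_eq_get?_getD, h]

-- lookup after a fold of inserts whose value depends only on the key
lemma get?_foldl_insert_const (ps : List (Int × Int)) (g : Int → List Int)
    (d : PySem.Dict Int (List Int)) (k : Int) :
    (ps.foldl (fun d kv => d.insert kv.1 (g kv.1)) d).get? k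
      = if k ∈ ps.map Prod.fst then some (g k) else d.get? k := by
  induction ps generalizing d with
  | nil => simp
  | cons a ps ih =>
    rw [List.foldl_cons, ih]
    by_cases hm : k ∈ ps.map Prod.fst
    · simp [hm]
    · by_cases he : k = a.1
      · simp [he, PySem.Dict.get?_insert_self]
      · simp [hm, he, PySem.Dict.get?_insert_of_ne _ _ he]

-- A's index list mapped to (key, successor) pairs equals B's pair list
lemma pairs_eq (lst : List Int) :
    (PySem.List.pyRange (-1) ((lst.length : Int) - 1) 1).map
        (fun i => (PySem.List.pyGetD lst i 0, PySem.List.pyGetD lst (i + 1) 0))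
      = (PySem.List.pyRange 0 (PySem.List.len lst) 1).map
        (fun i => (PySem.List.pyGetD lst (i - 1) 0, PySem.List.pyGetD lst i 0)) := by
  apply List.ext_getElem
  · simp [PySem.List.length_pyRange_one, PySem.List.len]
  · intro k h1 h2
    have hk : k < lst.length := by
      simpa [PySem.List.length_pyRange_one] using h1
    simp only [List.getElem_map, PySem.List.getElem_pyRange_one]
    have e1 : (-1 : Int) + k = 0 + k - 1 := by ring
    have e2 : (0 : Int) + k - 1 + 1 = 0 + k := by ring
    rw [e1, e2]

-- the grouping fold (A, after step_eq) and the dict comprehension (B) build equal dicts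
lemma folds_eq (ps : List (Int × Int)) :
    (ps.foldl (fun d kv => d.modify kv.1 [] (fun l => l ++ [kv.2]))
        (PySem.Dict.empty : PySem.Dict Int (List Int)))
      = (ps.foldl (fun d kv => d.insert kv.1 ((ps.filter (fun qs => qs.1 == kv.1)).map (·.2)))
        (PySem.Dict.empty : PySem.Dict Int (List Int))) := by
  apply PySem.Dict.ext
  have hkeysL : (ps.foldl (fun d kv => d.modify kv.1 [] (fun l => l ++ [kv.2]))
      (PySem.Dict.empty : PySem.Dict Int (List Int))).keys
      = PySem.Set.update (PySem.Dict.empty : PySem.Dict Int (List Int)).keys (ps.map Prod.fst) :=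
    PySem.Dict.keys_foldl_modify_key ..
  have hkeysR : (ps.foldl (fun d kv => d.insert kv.1 ((ps.filter (fun qs => qs.1 == kv.1)).map (·.2)))
      (PySem.Dict.empty : PySem.Dict Int (List Int))).keys
      = PySem.Set.update (PySem.Dict.empty : PySem.Dict Int (List Int)).keys (ps.map Prod.fst) :=
    PySem.Dict.keys_foldl_insert_key ..
  apply items_eq_of_keys_get?
  · rw [hkeysL, hkeysR]
  · rw [hkeysL]
    exact PySem.Set.nodup_update _ _ (by simp [PySem.Dict.keys_empty])
  · intro k
    rw [get?_foldl_insert_const ps (fun k => (ps.filter (fun qs => qs.1 == k)).map (·.2))]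
    by_cases hm : k ∈ ps.map Prod.fst
    · rw [if_pos hm]
      have hmem : k ∈ (ps.foldl (fun d kv => d.modify kv.1 [] (fun l => l ++ [kv.2]))
          (PySem.Dict.empty : PySem.Dict Int (List Int))).keys := by
        rw [hkeysL]
        exact (PySem.Set.mem_update ..).mpr (Or.inr hm)
      cases hq : (ps.foldl (fun d kv => d.modify kv.1 [] (fun l => l ++ [kv.2]))
          (PySem.Dict.empty : PySem.Dict Int (List Int))).get? k with
      | none =>
        exact absurd hmem ((PySem.Dict.get?_eq_none_iff_not_mem_keys ..).mp hq)
      | some v =>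
        have hv : v = (ps.filter (fun qs => qs.1 == k)).map (·.2) := by
          have hd := PySem.Dict.getD_foldl_modify_append (l := ps)
            (d := (PySem.Dict.empty : PySem.Dict Int (List Int))) (c := k)
          rw [PySem.Dict.getD_of_get?_eq_some _ [] hq] at hd
          simpa [PySem.Dict.getD_empty] using hd
        rw [hv]
    · rw [if_neg hm]
      have hnm : k ∉ (ps.foldl (fun d kv => d.modify kv.1 [] (fun l => l ++ [kv.2]))
          (PySem.Dict.empty : PySem.Dict Int (List Int))).keys := by
        rw [hkeysL]
        intro hc
        rcases (PySem.Set.mem_update ..).mp hc with h | h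
        · simp [PySem.Dict.keys_empty] at h
        · exact hm h
      rw [(PySem.Dict.get?_eq_none_iff_not_mem_keys ..).mpr hnm, PySem.Dict.get?_empty]

-- ===== VERDICT (by name: the statement is the Claim_ definition above) =====
theorem dicio_sucessores_spec : Claim_equal_dicio_sucessores := by
  intro lst _
  unfold Spec_dicio_sucessores dicio_sucessores dicio_sucessores_alt
  cases lst with
  | nil => rfl
  | cons x xs =>
    simp only [List.isEmpty_cons, if_false, Bool.false_eq_true]
    rw [if_neg (by simp; omega)]
    rw [show ((PySem.List.pyRange (-1) (((x :: xs).length : Int) - 1) 1).foldl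
        (fun dicio i =>
          match dicio.get? (PySem.List.pyGetD (x :: xs) i 0) with
          | some lista => dicio.insert (PySem.List.pyGetD (x :: xs) i 0)
              (lista ++ [PySem.List.pyGetD (x :: xs) (i + 1) 0])
          | none => dicio.insert (PySem.List.pyGetD (x :: xs) i 0)
              [PySem.List.pyGetD (x :: xs) (i + 1) 0])
        (PySem.Dict.empty : PySem.Dict Int (List Int)))
      = (((PySem.List.pyRange (-1) (((x :: xs).length : Int) - 1) 1).map
          (fun i => (PySem.List.pyGetD (x :: xs) i 0, PySem.List.pyGetD (x :: xs) (i + 1) 0))).foldl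
          (fun d kv => d.modify kv.1 [] (fun l => l ++ [kv.2]))
          (PySem.Dict.empty : PySem.Dict Int (List Int)))
      from by
        rw [List.foldl_map]
        congr 1
        funext d i
        exact step_eq d _ _]
    rw [pairs_eq (x :: xs), folds_eq]
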